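-- pv_equiv track=rewrite | github.com/ViggyC/4314Project | optimal_foraging_model.py | walk_to_position
-- ===== SOURCE A (Python) =====
-- def walk_to_position(random_walk): #This function takes a random walk as it's parameter, and returns a torus bouded positon list
--     pos=[]
--     for i in range(len(random_walk)):
--         if(i == 0): #First position is a random depth
--             y = random_walk[i]
--             while(y >= 2500): #Torus
--                 y -= 2500
--             while(y < 0):#Torus
--                 y+=2500
--             pos.append(y)#Add Initial position
--         else:
--             y = random_walk[i] + pos[i-1]
--             while(y >= 2500):
--                 y -= 2500
--             while(y < 0):
--                 y+=2500
--             pos.append(y)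
--     return pos
-- ===== SOURCE B (Python) =====
-- def walk_to_position(random_walk):
--     # Divide and conquer: the positions of any segment of the walk depend only
--     # on the entry position; solve each half recursively and stitch the right
--     # half onto the left half's last position.
--     def go(seg, base):
--         if len(seg) == 0:
--             return []
--         if len(seg) == 1:
--             return [(base + seg[0]) % 2500]
--         m = len(seg) // 2
--         left = go(seg[:m], base)
--         right = go(seg[m:], left[-1])
--         return left + right
--     return go(random_walk, 0)
-- ===== Notes on version B (the rewrite author's own statement) =====
-- stated objective: alternative
-- what changed: Replaces A's single fused left-to-right loop (per-step add then repeated +-2500 while-wrapping) with a divide-and-conquer recursion: each half of the walk is solved independently given its entry position, the right half being seeded with the left half's last position, and each position is wrapped with one modulo instead of A's repeated +-2500 loops.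
import Mathlib
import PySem

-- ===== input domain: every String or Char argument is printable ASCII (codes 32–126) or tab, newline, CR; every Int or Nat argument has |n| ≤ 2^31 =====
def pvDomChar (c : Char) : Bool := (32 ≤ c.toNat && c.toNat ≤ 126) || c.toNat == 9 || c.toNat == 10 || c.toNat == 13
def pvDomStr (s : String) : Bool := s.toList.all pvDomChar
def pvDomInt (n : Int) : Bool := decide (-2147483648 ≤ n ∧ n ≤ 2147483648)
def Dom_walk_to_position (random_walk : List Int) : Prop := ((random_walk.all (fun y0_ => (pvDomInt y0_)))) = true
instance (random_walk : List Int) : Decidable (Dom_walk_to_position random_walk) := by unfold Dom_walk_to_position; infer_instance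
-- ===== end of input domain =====

-- B replaces A's fused left-to-right add-then-while-wrap loop by a divide-and-conquer
-- recursion on halves of the walk, seeding the right half with the left half's last
-- position; each position is wrapped with one modulo instead of repeated +-2500 loops.

-- ===== PORT A =====
-- the 'while y >= 2500: y -= 2500' loop
def pvWrapDown (y : Int) : Int :=
  if 2500 ≤ y then pvWrapDown (y - 2500) else y
termination_by y.toNat
decreasing_by omega

-- the 'while y < 0: y += 2500' loop
def pvWrapUp (y : Int) : Int :=
  if y < 0 then pvWrapUp (y + 2500) else y
termination_by (-y).toNat
decreasing_by omega

def walk_to_position (random_walk : List Int) : List Int :=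
  (PySem.List.pyRange 0 (PySem.List.len random_walk) 1).foldl
    (fun pos i =>
      if i == 0 then
        pos ++ [pvWrapUp (pvWrapDown (PySem.List.pyGetD random_walk i 0))]
      else
        pos ++ [pvWrapUp (pvWrapDown (PySem.List.pyGetD random_walk i 0 + PySem.List.pyGetD pos (i - 1) 0))])
    []

-- ===== PORT B =====
-- the nested 'go(seg, base)' of Source B; seg[:m] / seg[m:] are PySem slices
def pvGo (seg : List Int) (base : Int) : List Int :=
  if seg.length = 0 then []
  else if seg.length = 1 then [PySem.Int.mod (base + PySem.List.pyGetD seg 0 0) 2500]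
  else
    let m : Nat := seg.length / 2
    let left := pvGo (PySem.List.slice seg none (some (m : Int))) base
    left ++ pvGo (PySem.List.slice seg (some (m : Int)) none) (PySem.List.pyGetD left (-1) 0)
termination_by seg.length
decreasing_by
  · simp only [PySem.List.slice_to_natCast, List.length_take]; omega
  · simp only [PySem.List.slice_from_natCast, List.length_drop]; omega

def walk_to_position_alt (random_walk : List Int) : List Int :=
  pvGo random_walk 0

-- ===== PRECONDITION & SPEC =====
def Spec_walk_to_position (random_walk : List Int) (out : List Int) : Prop := out = walk_to_position_alt random_walk
instance (random_walk : List Int) (out : List Int) : Decidable (Spec_walk_to_position random_walk out) := by unfold Spec_walk_to_position; infer_instance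

-- ===== CLAIM (what is proved, stated in full; the proofs are below) =====
def Claim_equal_walk_to_position : Prop := ∀ (random_walk : List Int), Dom_walk_to_position random_walk → Spec_walk_to_position random_walk (walk_to_position random_walk)

-- ===== LEMMAS AND PROOFS =====

theorem pvWrapDown_lt (y : Int) : pvWrapDown y < 2500 := by
  induction y using pvWrapDown.induct with
  | case1 y h ih => rw [pvWrapDown, if_pos h]; exact ih
  | case2 y h => rw [pvWrapDown, if_neg h]; omega

theorem pvWrapDown_emod (y : Int) : pvWrapDown y % 2500 = y % 2500 := by
  induction y using pvWrapDown.induct with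
  | case1 y h ih => rw [pvWrapDown, if_pos h]; omega
  | case2 y h => rw [pvWrapDown, if_neg h]

theorem pvWrapUp_eq (y : Int) (hy : y < 2500) : pvWrapUp y = y % 2500 := by
  induction y using pvWrapUp.induct with
  | case1 y h ih =>
      rw [pvWrapUp, if_pos h, ih (by omega)]; omega
  | case2 y h =>
      rw [pvWrapUp, if_neg h, Int.emod_eq_of_lt (by omega) hy]

theorem pvWrap_eq (y : Int) : pvWrapUp (pvWrapDown y) = y % 2500 := by
  rw [pvWrapUp_eq _ (pvWrapDown_lt y), pvWrapDown_emod]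

-- proof-side reference list: the raw prefix sums starting from `base`
def pvAccum (s : Int) : List Int → List Int
  | [] => []
  | x :: xs => (s + x) :: pvAccum (s + x) xs

-- the common specification both ports are reduced to
def pvSpecList (seg : List Int) (base : Int) : List Int :=
  (pvAccum base seg).map (fun s => s % 2500)

theorem pvAccum_append (s : Int) (ys zs : List Int) :
    pvAccum s (ys ++ zs) = pvAccum s ys ++ pvAccum (s + ys.sum) zs := by
  induction ys generalizing s with
  | nil => simp [pvAccum]
  | cons a t ih => simp [pvAccum, ih, add_assoc]

theorem pvAccum_length (s : Int) (l : List Int) : (pvAccum s l).length = l.length := by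
  induction l generalizing s with
  | nil => rfl
  | cons a t ih => simp [pvAccum, ih]

theorem pvSpecList_append (ys zs : List Int) (base : Int) :
    pvSpecList (ys ++ zs) base = pvSpecList ys base ++ pvSpecList zs (base + ys.sum) := by
  unfold pvSpecList
  rw [pvAccum_append, List.map_append]

theorem pvSpecList_congr (seg : List Int) (b b' : Int) (h : b % 2500 = b' % 2500) :
    pvSpecList seg b = pvSpecList seg b' := by
  induction seg generalizing b b' with
  | nil => rfl
  | cons x xs ih =>
      have h1 : (b + x) % 2500 = (b' + x) % 2500 := by omega
      have h2 := ih (b + x) (b' + x) h1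
      unfold pvSpecList pvAccum
      unfold pvSpecList at h2
      simp only [List.map_cons]
      rw [h1, h2]

theorem pvSpecList_length (seg : List Int) (base : Int) :
    (pvSpecList seg base).length = seg.length := by
  unfold pvSpecList; simp [pvAccum_length]

theorem pvSpecList_last (ys : List Int) (x base : Int) :
    PySem.List.pyGetD (pvSpecList (ys ++ [x]) base) (-1) 0 = (base + ys.sum + x) % 2500 := by
  rw [pvSpecList_append]
  simp [pvSpecList, pvAccum, PySem.List.pyGetD_neg_one_append_singleton]

theorem pvGo_eq_spec_aux (n : Nat) : ∀ (seg : List Int) (base : Int),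
    seg.length ≤ n → pvGo seg base = pvSpecList seg base := by
  induction n with
  | zero =>
      intro seg base h
      have h0 : seg.length = 0 := by omega
      rw [pvGo, if_pos h0, List.length_eq_zero_iff.mp h0]; rfl
  | succ n ih =>
      intro seg base hle
      by_cases h0 : seg.length = 0
      · rw [pvGo, if_pos h0, List.length_eq_zero_iff.mp h0]; rfl
      by_cases h1 : seg.length = 1
      · obtain ⟨x, hx⟩ := List.length_eq_one_iff.mp h1
        subst hx
        rw [pvGo]
        simp [pvSpecList, pvAccum, PySem.List.pyGetD_zero_cons]
      · rw [pvGo, if_neg h0, if_neg h1]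
        simp only [PySem.List.slice_to_natCast, PySem.List.slice_from_natCast]
        have h2 : 2 ≤ seg.length := by omega
        have hm1 : 1 ≤ seg.length / 2 := by omega
        have hml : seg.length / 2 < seg.length := by omega
        have htl : (seg.take (seg.length / 2)).length = seg.length / 2 := by simp; omega
        rw [ih (seg.take (seg.length / 2)) base (by simp; omega)]
        obtain ⟨ys, x, hyx⟩ : ∃ ys x, seg.take (seg.length / 2) = ys ++ [x] := by
          rcases List.eq_nil_or_concat (seg.take (seg.length / 2)) with h | ⟨ys, x, h⟩
          · exfalso; rw [h] at htl; simp at htl; omega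
          · exact ⟨ys, x, by simpa [List.concat_eq_append] using h⟩
        rw [hyx, pvSpecList_last,
          ih (seg.drop (seg.length / 2)) _ (by simp; omega),
          pvSpecList_congr (seg.drop (seg.length / 2)) ((base + ys.sum + x) % 2500)
            (base + (ys ++ [x]).sum) (by simp; omega),
          ← hyx, ← pvSpecList_append, List.take_append_drop]

theorem pvGo_eq_spec (seg : List Int) (base : Int) : pvGo seg base = pvSpecList seg base :=
  pvGo_eq_spec_aux seg.length seg base le_rfl

theorem walk_eq_spec (rw_ : List Int) : walk_to_position rw_ = pvSpecList rw_ 0 := by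
  induction rw_ using List.reverseRecOn with
  | nil => rfl
  | append_singleton ys x ih =>
      have halt : pvSpecList (ys ++ [x]) 0 = pvSpecList ys 0 ++ [(ys.sum + x) % 2500] := by
        rw [pvSpecList_append]
        simp [pvSpecList, pvAccum]
      rw [halt]
      unfold walk_to_position
      have hlen : PySem.List.len (ys ++ [x]) = (ys.length : Int) + 1 := by
        simp [PySem.List.len_eq]
      rw [hlen, PySem.List.pyRange_one_succ_right (by positivity), List.foldl_append]
      have hcongr :
          (PySem.List.pyRange 0 (ys.length : Int) 1).foldl
            (fun pos i =>
              if i == 0 then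
                pos ++ [pvWrapUp (pvWrapDown (PySem.List.pyGetD (ys ++ [x]) i 0))]
              else
                pos ++ [pvWrapUp (pvWrapDown (PySem.List.pyGetD (ys ++ [x]) i 0 + PySem.List.pyGetD pos (i - 1) 0))]) [] =
          (PySem.List.pyRange 0 (ys.length : Int) 1).foldl
            (fun pos i =>
              if i == 0 then
                pos ++ [pvWrapUp (pvWrapDown (PySem.List.pyGetD ys i 0))]
              else
                pos ++ [pvWrapUp (pvWrapDown (PySem.List.pyGetD ys i 0 + PySem.List.pyGetD pos (i - 1) 0))]) [] := by
        apply PySem.List.foldl_congr_mem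
        intro acc i hi
        rw [PySem.List.mem_pyRange_one] at hi
        have hget : PySem.List.pyGetD (ys ++ [x]) i 0 = PySem.List.pyGetD ys i 0 := by
          rw [PySem.List.pyGetD_eq_getElem (ys ++ [x]) 0 hi.1 (by simp [List.length_append]; omega),
              PySem.List.pyGetD_eq_getElem ys 0 hi.1 (by exact_mod_cast hi.2),
              List.getElem_append_left]
        rw [hget]
      rw [hcongr]
      have hA : (PySem.List.pyRange 0 (ys.length : Int) 1).foldl
            (fun pos i =>
              if i == 0 then
                pos ++ [pvWrapUp (pvWrapDown (PySem.List.pyGetD ys i 0))]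
              else
                pos ++ [pvWrapUp (pvWrapDown (PySem.List.pyGetD ys i 0 + PySem.List.pyGetD pos (i - 1) 0))]) []
          = pvSpecList ys 0 := by
        rw [← ih]; unfold walk_to_position; simp [PySem.List.len_eq]
      rw [hA]
      simp only [List.foldl_cons, List.foldl_nil]
      -- last step: index i = ys.length
      rcases List.eq_nil_or_concat ys with hnil | ⟨zs, w, hzw⟩
      · subst hnil
        simp only [List.length_nil, Nat.cast_zero, beq_self_eq_true, if_true, List.nil_append]
        rw [PySem.List.pyGetD_zero_cons, pvWrap_eq]
        simp
      · rw [List.concat_eq_append] at hzw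
        have hne : ((ys.length : Int) == 0) = false := by
          subst hzw; simp [List.length_append]; omega
        rw [hne]
        simp only [Bool.false_eq_true, if_false]
        have hx : PySem.List.pyGetD (ys ++ [x]) (ys.length : Int) 0 = x := by
          rw [PySem.List.pyGetD_eq_getElem (ys ++ [x]) 0 (by positivity) (by simp)]
          simp
        have hlast : PySem.List.pyGetD (pvSpecList ys 0) ((ys.length : Int) - 1) 0
            = ys.sum % 2500 := by
          subst hzw
          rw [pvSpecList_append]
          have hl : (pvSpecList zs 0).length = zs.length := pvSpecList_length zs 0
          have h1 : ((zs ++ [w]).length : Int) - 1 = ((pvSpecList zs 0).length : Int) := by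
            simp [hl]
          rw [h1, PySem.List.pyGetD_eq_getElem _ 0 (by positivity) (by simp [pvSpecList_length])]
          unfold pvSpecList pvAccum
          simp
        rw [hx, hlast, pvWrap_eq, add_comm x (ys.sum % 2500), Int.emod_add_emod]

-- ===== VERDICT (by name: the statement is the Claim_ definition above) =====
theorem walk_to_position_spec : Claim_equal_walk_to_position := by
  intro rw_ _
  unfold Spec_walk_to_position walk_to_position_alt
  rw [walk_eq_spec, pvGo_eq_spec]
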